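-- pv_equiv track=rewrite | github.com/Coltainz/4110formalLanguage | main.py | is_in_language_L
-- ===== SOURCE A (Python) =====
-- def is_in_language_L(s):
--     if len(s) == 0:
--         return False
--
--     for ch in s:
--         if ch not in ("a", "b"):
--             return False
--
--     i = 0
--     n = len(s)
--     while i < n and s[i] == 'a':
--         i+=1
--
--     count_a = i
--
--     if count_a == 0:
--         return False
--
--     while i < n and s[i] == 'b':
--         i+=1
--
--     count_b = n - count_a
--
--     if i != n:
--         return False
--
--     if count_b != count_a:
--         return False
--
--     return True
-- ===== SOURCE B (Python) =====
-- def is_in_language_L(s):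
--     k = len(s) // 2
--     return len(s) > 0 and len(s) % 2 == 0 and s == "a" * k + "b" * k
-- ===== Notes on version B (the rewrite author's own statement) =====
-- stated objective: idiomatic
-- what changed: Instead of scanning character classes and counting runs with two while loops, B builds the unique valid string 'a'*k+'b'*k for k=len(s)//2 and compares it to s after two length guards.
import Mathlib
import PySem

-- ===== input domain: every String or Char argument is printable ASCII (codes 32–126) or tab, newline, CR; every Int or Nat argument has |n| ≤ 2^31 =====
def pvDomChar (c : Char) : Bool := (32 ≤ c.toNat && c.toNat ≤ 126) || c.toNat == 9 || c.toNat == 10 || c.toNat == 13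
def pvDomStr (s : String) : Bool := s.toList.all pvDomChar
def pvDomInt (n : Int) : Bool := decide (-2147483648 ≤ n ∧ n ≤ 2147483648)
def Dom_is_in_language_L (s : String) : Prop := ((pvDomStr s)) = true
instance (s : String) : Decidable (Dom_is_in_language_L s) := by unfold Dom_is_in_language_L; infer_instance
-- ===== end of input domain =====

-- B replaces A's run-scanning loops by building the unique valid string of s's length and comparing (idiomatic, same cost).

-- ===== PORT A =====
-- first while loop of A: count leading 'a's
def pvLeadA : List Char → Nat
  | [] => 0
  | c :: t => if c = 'a' then pvLeadA t + 1 else 0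

-- second while loop of A: count leading 'b's (starting where the first loop stopped)
def pvLeadB : List Char → Nat
  | [] => 0
  | c :: t => if c = 'b' then pvLeadB t + 1 else 0

def is_in_language_L (s : String) : Bool :=
  let cs := s.toList
  if cs.length = 0 then false
  else if ¬ (cs.all (fun ch => ch == 'a' || ch == 'b')) then false
  else
    let count_a := pvLeadA cs
    if count_a = 0 then false
    else
      let i := count_a + pvLeadB (cs.drop count_a)
      let count_b := cs.length - count_a
      if i ≠ cs.length then false
      else if count_b ≠ count_a then false
      else true

-- ===== PORT B =====
def is_in_language_L_alt (s : String) : Bool :=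
  let n := s.toList.length
  let k := n / 2
  decide (0 < n) && decide (n % 2 = 0)
    && (s.toList == List.replicate k 'a' ++ List.replicate k 'b')

-- ===== PRECONDITION & SPEC =====
def Spec_is_in_language_L (s : String) (out : Bool) : Prop := out = is_in_language_L_alt s
instance (s : String) (out : Bool) : Decidable (Spec_is_in_language_L s out) := by unfold Spec_is_in_language_L; infer_instance

-- ===== CLAIM (what is proved, stated in full; the proofs are below) =====
def Claim_equal_is_in_language_L : Prop := ∀ (s : String), Dom_is_in_language_L s → Spec_is_in_language_L s (is_in_language_L s)

-- ===== LEMMAS AND PROOFS =====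

theorem pvLeadA_le (cs : List Char) : pvLeadA cs ≤ cs.length := by
  induction cs with
  | nil => simp [pvLeadA]
  | cons c t ih => simp only [pvLeadA, List.length_cons]; split <;> omega

theorem take_pvLeadA (cs : List Char) : cs.take (pvLeadA cs) = List.replicate (pvLeadA cs) 'a' := by
  induction cs with
  | nil => simp [pvLeadA]
  | cons c t ih =>
    by_cases h : c = 'a'
    · simp [pvLeadA, h, List.replicate_succ, ih]
    · simp [pvLeadA, h]

theorem pvLeadB_full (cs : List Char) (h : pvLeadB cs = cs.length) :
    cs = List.replicate cs.length 'b' := by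
  induction cs with
  | nil => simp
  | cons c t ih =>
    by_cases hc : c = 'b'
    · subst hc
      simp [pvLeadB] at h
      rw [List.length_cons, List.replicate_succ, ← ih h]
    · simp only [pvLeadB, if_neg hc, List.length_cons] at h
      omega

theorem pvLeadA_repl_append (k : Nat) (t : List Char) :
    pvLeadA (List.replicate k 'a' ++ t) = k + pvLeadA t := by
  induction k with
  | zero => simp
  | succ n ih => simp [List.replicate_succ, pvLeadA, ih]; omega

theorem pvLeadB_repl (k : Nat) : pvLeadB (List.replicate k 'b') = k := by
  induction k with
  | zero => simp [pvLeadB]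
  | succ n ih => simp [List.replicate_succ, pvLeadB, ih]

theorem pvLeadA_repl_b (k : Nat) (hk : 0 < k) : pvLeadA (List.replicate k 'b') = 0 := by
  cases k with
  | zero => omega
  | succ n => simp [List.replicate_succ, pvLeadA]

-- characterization of B's boolean as a proposition
theorem pvAltB (cs : List Char) :
    (decide (0 < cs.length) && decide (cs.length % 2 = 0)
      && (cs == List.replicate (cs.length / 2) 'a' ++ List.replicate (cs.length / 2) 'b')) = true
    ↔ (0 < cs.length ∧ cs.length % 2 = 0
        ∧ cs = List.replicate (cs.length / 2) 'a' ++ List.replicate (cs.length / 2) 'b') := by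
  simp [and_assoc]

-- if cs is the canonical string 'a'^k 'b'^k with 0 < k, then A's run counts are exactly k
theorem pv_canon (cs : List Char) (k : Nat) (hk0 : 0 < k)
    (heq : cs = List.replicate k 'a' ++ List.replicate k 'b') :
    pvLeadA cs = k ∧ cs.drop k = List.replicate k 'b' := by
  subst heq
  constructor
  · rw [pvLeadA_repl_append, pvLeadA_repl_b _ hk0]
    omega
  · rw [List.drop_append_of_le_length (by simp), List.drop_replicate]
    simp

theorem pv_main (s : String) : is_in_language_L s = is_in_language_L_alt s := by
  simp only [is_in_language_L, is_in_language_L_alt]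
  generalize s.toList = cs
  by_cases h0 : cs.length = 0
  · simp [h0]
  rw [if_neg h0]
  by_cases hall : cs.all (fun ch => ch == 'a' || ch == 'b')
  · rw [if_neg (by simp [hall])]
    by_cases hca0 : pvLeadA cs = 0
    · -- head is not 'a'; the canonical string starts with 'a' when the guards pass
      rw [if_pos hca0]
      symm
      rw [← Bool.not_eq_true, pvAltB]
      rintro ⟨hpos, hev, heq⟩
      have := (pv_canon cs (cs.length / 2) (by omega) heq).1
      omega
    · rw [if_neg hca0]
      by_cases hin : pvLeadA cs + pvLeadB (cs.drop (pvLeadA cs)) ≠ cs.length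
      · rw [if_pos hin]
        symm
        rw [← Bool.not_eq_true, pvAltB]
        rintro ⟨hpos, hev, heq⟩
        obtain ⟨hA, hD⟩ := pv_canon cs (cs.length / 2) (by omega) heq
        apply hin
        rw [hA, hD, pvLeadB_repl]
        have := congrArg List.length heq
        simp at this
        omega
      · rw [not_ne_iff] at hin
        rw [if_neg (by omega)]
        by_cases hcb : cs.length - pvLeadA cs ≠ pvLeadA cs
        · rw [if_pos hcb]
          symm
          rw [← Bool.not_eq_true, pvAltB]
          rintro ⟨hpos, hev, heq⟩
          obtain ⟨hA, _⟩ := pv_canon cs (cs.length / 2) (by omega) heq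
          apply hcb
          omega
        · rw [not_ne_iff] at hcb
          rw [if_neg (by omega)]
          -- A returns true; reconstruct cs = replicate k 'a' ++ replicate k 'b'
          have hcale : pvLeadA cs ≤ cs.length := pvLeadA_le cs
          have hdlen : (cs.drop (pvLeadA cs)).length = cs.length - pvLeadA cs := by simp
          have hlb : pvLeadB (cs.drop (pvLeadA cs)) = (cs.drop (pvLeadA cs)).length := by
            rw [hdlen]; omega
          have hdrop : cs.drop (pvLeadA cs) = List.replicate (cs.length - pvLeadA cs) 'b' := by
            have := pvLeadB_full _ hlb
            rwa [hdlen] at this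
          have hsplit : cs = List.replicate (pvLeadA cs) 'a'
              ++ List.replicate (cs.length - pvLeadA cs) 'b' := by
            conv_lhs => rw [← List.take_append_drop (pvLeadA cs) cs]
            rw [take_pvLeadA, hdrop]
          symm
          rw [pvAltB]
          refine ⟨by omega, by omega, ?_⟩
          have hk : cs.length / 2 = pvLeadA cs := by omega
          rw [hk]
          conv_lhs => rw [hsplit]
          rw [hcb]
  · rw [if_pos (by simpa using hall)]
    symm
    rw [← Bool.not_eq_true, pvAltB]
    rintro ⟨_, _, heq⟩
    apply hall
    rw [heq]
    simp [List.all_append, List.all_replicate]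

-- ===== VERDICT (by name: the statement is the Claim_ definition above) =====
theorem is_in_language_L_spec : Claim_equal_is_in_language_L := by
  intro s _
  exact pv_main s
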